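-- pv_equiv track=rewrite | github.com/Alex-Karapetkov/CS412-NP-Complete-Project | code_solution/cs412_tsp_approx.py | approx_tsp_tour
-- ===== SOURCE A (Python) =====
-- import heapq
--
-- def create_graph(edges):
--     graph = {}
--     for edge in edges:
--         node1, node2, weight = edge
--         # add nodes and corresponding edges to graph
--         if node1 not in graph:
--             graph[node1] = []
--         if node2 not in graph:
--             graph[node2] = []
--         graph[node1].append((weight, node1, node2))
--         graph[node2].append((weight, node2, node1))
--     return graph
--
-- def prim(edges):
--     graph = create_graph(edges)
--     start_node = edges[0][0]
--     # dictionary to track visited nodes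
--     visited = {node: False for node in graph}
--     mst_edges = []
--     edge_list = []
--
--     # start from the first node
--     visited[start_node] = True
--     for edge in graph[start_node]:
--         # add edges of root vertex to the priority queue
--         heapq.heappush(edge_list, edge)
--
--     # while there are still edges from original graph
--     while edge_list:
--         # find node from old graph with the smallest connecting edge to the new graph T
--         weight, node1, node2 = heapq.heappop(edge_list)
--         if visited[node2] == False:
--             visited[node2] = True
--             # add the edge and connected node to the minimum spanning tree
--             mst_edges.append((node1, node2, weight))
--
--             # add edges connected to the new node to the priority queue
--             for edge in graph[node2]:
--                 if visited[edge[2]] == False: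
--                     # if connecting node has not been visited, add to pq
--                     heapq.heappush(edge_list, edge)
--
--     return mst_edges
--
-- def preorder_walk(tree, root):
--     def dfs(v):
--         visited.add(v)
--         tour.append(v)
--         for w, _ in tree.get(v, []):
--             if w not in visited:
--                 dfs(w)
--
--     visited = set()
--     tour = []
--     dfs(root)
--     return tour
--
-- def approx_tsp_tour(edges):
--     # compute minimum spanning tree using Prim's algorithm
--     mst_edges = prim(edges)
--     root = edges[0][0]
--     tree = {}
--
--     # Build tree from MST edges
--     for node1, node2, weight in mst_edges:
--         if node1 not in tree:
--             tree[node1] = []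
--         if node2 not in tree:
--             tree[node2] = []
--         tree[node1].append((node2, weight))
--         tree[node2].append((node1, weight))
--
--     # generate preorder walk of the minimum spanning tree
--     H = preorder_walk(tree, root)
--     H.append(root)
--
--     # calculate total weight of hamiltonian cycle
--     total_weight = 0
--     for w in range(len(H) - 1):
--         for node, weight in tree[H[w]]:
--             if node == H[w + 1]:
--                 total_weight += weight
--                 break
--
--     # add weight of edge from last node to first node
--     for edge in edges:
--         if (edge[0] == H[-2] and edge[1] == H[0]) or (edge[1] == H[-2] and edge[0] == H[0]):
--             total_weight += edge[2]
--             break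
--
--     return H, total_weight
-- ===== SOURCE B (Python) =====
-- def approx_tsp_tour(edges):
--     # selection-based (dense) Prim: no heap, no adjacency dict; repeatedly scan
--     # all directed edge copies for the lexicographically smallest crossing edge
--     root = edges[0][0]
--     darts = [(w, a, b) for u, v, w in edges for a, b in ((u, v), (v, u))]
--     visited = {root}
--     mst_edges = []
--     while True:
--         best = None
--         for w, a, b in darts:
--             if a in visited and b not in visited and (best is None or (w, a, b) < best):
--                 best = (w, a, b)
--         if best is None:
--             break
--         w, a, b = best
--         visited.add(b)
--         mst_edges.append((a, b, w))
--
--     # adjacency lists of the MST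
--     tree = {}
--     for node1, node2, weight in mst_edges:
--         if node1 not in tree:
--             tree[node1] = []
--         if node2 not in tree:
--             tree[node2] = []
--         tree[node1].append((node2, weight))
--         tree[node2].append((node1, weight))
--
--     # iterative preorder walk: explicit stack instead of recursion;
--     # neighbours pushed in reverse so they pop in recursion order
--     H = []
--     seen = set()
--     stack = [root]
--     while stack:
--         v = stack.pop()
--         if v in seen:
--             continue
--         seen.add(v)
--         H.append(v)
--         for w, _ in reversed(tree.get(v, [])):
--             stack.append(w)
--     H.append(root)
--
--     # pair-indexed weight table (first MST edge per ordered pair wins)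
--     wt = {}
--     for node1, node2, weight in mst_edges:
--         wt.setdefault((node1, node2), weight)
--         wt.setdefault((node2, node1), weight)
--     total_weight = sum(wt.get((a, b), 0) for a, b in zip(H, H[1:]))
--     total_weight += next((w for a, b, w in edges
--                           if (a == H[-2] and b == H[0]) or (b == H[-2] and a == H[0])), 0)
--     return H, total_weight
-- ===== Notes on version B (the rewrite author's own statement) =====
-- stated objective: alternative
-- what changed: B replaces the heap-and-adjacency-dict Prim by a selection-based dense Prim (repeated minimum scan over the flat list of directed edge copies, no heap, no graph dict), replaces the recursive preorder walk by an explicit stack-based iterative DFS (neighbours pushed in reverse), and replaces the two weight-summation scans by a pair-indexed weight dictionary built once from the MST plus a single pass over consecutive tour pairs with a find-first closing edge.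
import Mathlib
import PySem

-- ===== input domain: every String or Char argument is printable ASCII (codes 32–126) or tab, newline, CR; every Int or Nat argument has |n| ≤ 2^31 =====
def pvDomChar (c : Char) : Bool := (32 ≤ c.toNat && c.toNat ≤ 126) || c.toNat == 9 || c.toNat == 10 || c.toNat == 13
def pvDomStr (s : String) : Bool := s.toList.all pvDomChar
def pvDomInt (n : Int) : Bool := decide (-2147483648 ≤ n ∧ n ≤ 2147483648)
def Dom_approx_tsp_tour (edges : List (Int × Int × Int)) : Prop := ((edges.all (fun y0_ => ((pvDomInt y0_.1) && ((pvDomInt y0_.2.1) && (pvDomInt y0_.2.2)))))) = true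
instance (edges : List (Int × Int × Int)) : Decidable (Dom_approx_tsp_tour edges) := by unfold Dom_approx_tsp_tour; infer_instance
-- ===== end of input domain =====

-- B rebuilds the MST with a selection-based (dense) Prim — a repeated minimum scan over the
-- flat list of directed edge copies, with no heap and no adjacency dictionary — walks the tree
-- with an explicit stack instead of recursion, and sums weights through a pair-indexed table.

-- ===== PORT A =====
-- heapq on triples of ints compares tuples lexicographically
def tle (a b : Int × Int × Int) : Bool :=
  a.1 < b.1 || (a.1 == b.1 && (a.2.1 < b.2.1 || (a.2.1 == b.2.1 && a.2.2 ≤ b.2.2)))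

-- heapq.heappush, modelling the heap as a list sorted by tle (heappop = head):
-- heapq pops elements in nondecreasing order and equal elements are equal triples,
-- so the sorted-list model is observationally exact.
def hpush : List (Int × Int × Int) → (Int × Int × Int) → List (Int × Int × Int)
  | [], x => [x]
  | y :: ys, x => if tle x y then x :: y :: ys else y :: hpush ys x

-- one iteration of create_graph's loop
def gStep (g : PySem.Dict Int (List (Int × Int × Int))) (e : Int × Int × Int) :
    PySem.Dict Int (List (Int × Int × Int)) :=
  let g := if g.contains e.1 then g else g.insert e.1 []
  let g := if g.contains e.2.1 then g else g.insert e.2.1 []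
  let g := g.modify e.1 [] (· ++ [(e.2.2, e.1, e.2.1)])
  g.modify e.2.1 [] (· ++ [(e.2.2, e.2.1, e.1)])

def createGraph (edges : List (Int × Int × Int)) : PySem.Dict Int (List (Int × Int × Int)) :=
  edges.foldl gStep PySem.Dict.empty

-- number of unvisited entries of the visited dict (termination measure only)
def ucD (visited : PySem.Dict Int Bool) : Nat := visited.values.count false

-- strict countP monotonicity with one witness (termination-measure step, cited by the ports)
theorem countP_lt_of_mem {α : Type} {p q : α → Bool} {l : List α}
    (hpq : ∀ a, p a = true → q a = true) {x : α} (hx : x ∈ l)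
    (hq : q x = true) (hp : p x = false) : l.countP p < l.countP q := by
  induction l with
  | nil => cases hx
  | cons a t ih =>
    have hmono := List.countP_mono_left (l := t) (p := p) (q := q) (fun a _ h => hpq a h)
    rcases List.mem_cons.mp hx with rfl | hxt
    · simp only [List.countP_cons, hp, hq]
      simp only [Bool.false_eq_true, if_false, if_true]
      omega
    · have hlt := ih hxt
      have hle : (if p a = true then 1 else 0) ≤ (if q a = true then 1 else 0) := by
        by_cases hpa : p a = true
        · simp [hpa, hpq a hpa]
        · simp [hpa]
      simp only [List.countP_cons]
      omega

theorem ucD_insert_lt (d : PySem.Dict Int Bool) (v : Int) (h : d.getD v true = false) :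
    ucD (d.insert v true) < ucD d := by
  have hg : d.get? v = some false := by
    rw [PySem.Dict.getD_eq_get?_getD] at h
    cases hx : d.get? v with
    | none => rw [hx] at h; simp at h
    | some b => rw [hx] at h; simpa using h
  have hc : d.contains v = true := by
    rw [PySem.Dict.contains_eq_isSome_get?, hg]; rfl
  have hmem : (v, false) ∈ d.items := PySem.Dict.mem_items_of_get?_eq_some _ hg
  unfold ucD
  rw [PySem.Dict.values, PySem.Dict.values, PySem.Dict.items_insert]
  simp only [hc, if_true, List.map_map, List.count_eq_countP, List.countP_map]
  refine countP_lt_of_mem (p := fun p => (((fun p => if (p.1 == v) = true then (v, true) else p) p).2 == false))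
    (q := fun p => (p.2 == false)) ?_ hmem (by simp) (by simp)
  intro a ha
  by_cases hav : (a.1 == v) = true <;> simp [hav] at ha ⊢
  exact ha

-- the while-loop of prim; `visited[node2]` is read with default True (the key is always
-- present when the loop runs on real inputs, so the default is never consulted)
def primLoop (graph : PySem.Dict Int (List (Int × Int × Int)))
    (visited : PySem.Dict Int Bool) (mst : List (Int × Int × Int)) :
    List (Int × Int × Int) → List (Int × Int × Int)
  | [] => mst
  | (w, u, v) :: rest =>
    if h : visited.getD v true = false then
      let visited' := visited.insert v true
      let heap' := (graph.getD v []).foldl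
        (fun hp e => if visited'.getD e.2.2 true = false then hpush hp e else hp) rest
      primLoop graph visited' (mst ++ [(u, v, w)]) heap'
    else
      primLoop graph visited mst rest
  termination_by heap => (ucD visited, heap.length)
  decreasing_by
  · exact Prod.Lex.left _ _ (ucD_insert_lt visited v h)
  · exact Prod.Lex.right _ (Nat.lt_succ_self _)

def prim (edges : List (Int × Int × Int)) : List (Int × Int × Int) :=
  let graph := createGraph edges
  let start := (edges.headD (0, 0, 0)).1       -- edges[0][0]; [] raises IndexError (outside Pre_)
  let visited := graph.keys.foldl (fun d k => d.insert k false) PySem.Dict.empty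
  let visited := visited.insert start true
  let heap := (graph.getD start []).foldl hpush []
  primLoop graph visited [] heap

-- one iteration of the tree-building loop (this loop is textually identical in Source A and Source B,
-- so the helper is shared by both ports)
def treeStep (t : PySem.Dict Int (List (Int × Int))) (e : Int × Int × Int) :
    PySem.Dict Int (List (Int × Int)) :=
  let t := if t.contains e.1 then t else t.insert e.1 []
  let t := if t.contains e.2.1 then t else t.insert e.2.1 []
  let t := t.modify e.1 [] (· ++ [(e.2.1, e.2.2)])
  t.modify e.2.1 [] (· ++ [(e.1, e.2.2)])

def buildTree (mst : List (Int × Int × Int)) : PySem.Dict Int (List (Int × Int)) :=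
  mst.foldl treeStep PySem.Dict.empty

-- A-side: the recursive dfs of preorder_walk, on a pending list (the guarded recursive
-- calls of the for-loop), with a fuel guard for totality (proved sufficient below)
def dfsA (tree : PySem.Dict Int (List (Int × Int))) :
    Nat → List Int → PySem.Set Int × List Int → PySem.Set Int × List Int
  | _, [], s => s
  | fuel, v :: vs, s =>
    if PySem.Set.contains s.1 v then dfsA tree fuel vs s
    else match fuel with
      | 0 => s
      | fuel + 1 =>
        dfsA tree fuel vs
          (dfsA tree fuel ((tree.getD v []).map Prod.fst) (PySem.Set.add s.1 v, s.2 ++ [v]))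
  termination_by fuel l _ => (fuel, l.length)

def adjMax (tree : PySem.Dict Int (List (Int × Int))) : Nat :=
  tree.values.foldl (fun m l => max m l.length) 0

def fuelBound (tree : PySem.Dict Int (List (Int × Int))) : Nat :=
  tree.keys.length * (adjMax tree + 2) + 1

-- first match of the closing-edge for-loop (A breaks at the first hit)
def closingA : List (Int × Int × Int) → Int → Int → Int
  | [], _, _ => 0
  | (a, b, w) :: rest, x, y =>
    if (a == x && b == y) || (b == x && a == y) then w else closingA rest x y

def approx_tsp_tour (edges : List (Int × Int × Int)) : List Int × Int :=
  let mst := prim edges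
  let root := (edges.headD (0, 0, 0)).1
  let tree := buildTree mst
  let H := (dfsA tree (fuelBound tree) [root] (PySem.Set.empty, [])).2 ++ [root]
  let tw := (PySem.List.pyRange 0 (PySem.List.len H - 1) 1).foldl (fun acc i =>
    match (tree.getD (PySem.List.pyGetD H i 0) []).find?
        (fun p => p.1 == PySem.List.pyGetD H (i + 1) 0) with
    | some p => acc + p.2
    | none => acc) 0
  let tw := tw + closingA edges (PySem.List.pyGetD H (-2) 0) (PySem.List.pyGetD H 0 0)
  (H, tw)

-- ===== PORT B =====
-- the flat list of both directed copies of every edge, as (w, src, dst) triples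
def darts (edges : List (Int × Int × Int)) : List (Int × Int × Int) :=
  edges.flatMap (fun e => [(e.2.2, e.1, e.2.1), (e.2.2, e.2.1, e.1)])

-- strict tuple comparison `(w, a, b) < best`
def lt3 (a b : Int × Int × Int) : Bool :=
  a.1 < b.1 || (a.1 == b.1 && (a.2.1 < b.2.1 || (a.2.1 == b.2.1 && a.2.2 < b.2.2)))

-- `a in visited and b not in visited`
def isCand (vis : PySem.Set Int) (c : Int × Int × Int) : Bool :=
  PySem.Set.contains vis c.2.1 && !(PySem.Set.contains vis c.2.2)

-- one step of the best-candidate scan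
def bestStep (vis : PySem.Set Int) (best : Option (Int × Int × Int)) (c : Int × Int × Int) :
    Option (Int × Int × Int) :=
  if isCand vis c && best.all (fun b => lt3 c b) then some c else best

def bestCand (ds : List (Int × Int × Int)) (vis : PySem.Set Int) : Option (Int × Int × Int) :=
  ds.foldl (bestStep vis) none

-- a returned best candidate comes from the scanned list and crosses the cut (cited by selLoop)
theorem foldl_bestStep_some (vis : PySem.Set Int) :
    ∀ (ds : List (Int × Int × Int)) (acc m), ds.foldl (bestStep vis) acc = some m →
      (m ∈ ds ∧ isCand vis m = true) ∨ acc = some m := by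
  intro ds
  induction ds with
  | nil => intro acc m h; exact Or.inr h
  | cons c t ih =>
    intro acc m h
    simp only [List.foldl_cons] at h
    rcases ih _ _ h with ⟨hm, hc⟩ | hacc
    · exact Or.inl ⟨List.mem_cons_of_mem _ hm, hc⟩
    · by_cases hcond : (isCand vis c && acc.all (fun b => lt3 c b)) = true
      · unfold bestStep at hacc
        rw [if_pos hcond] at hacc
        cases hacc
        exact Or.inl ⟨List.mem_cons_self, (Bool.and_eq_true _ _ |>.mp hcond).1⟩
      · unfold bestStep at hacc
        rw [if_neg hcond] at hacc
        exact Or.inr hacc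

theorem contains_add_eq (vis : PySem.Set Int) (v k : Int) :
    PySem.Set.contains (PySem.Set.add vis v) k = (PySem.Set.contains vis k || k == v) := by
  rw [Bool.eq_iff_iff]
  simp only [Bool.or_eq_true, beq_iff_eq, PySem.Set.contains_iff]
  exact PySem.Set.mem_add _ _ _

-- accepting a candidate strictly shrinks the count of darts into unvisited nodes (termination)
theorem selMeasure_lt (ds : List (Int × Int × Int)) (vis : PySem.Set Int)
    (m : Int × Int × Int) (hm : m ∈ ds) (hc : isCand vis m = true) :
    ds.countP (fun c => !(PySem.Set.contains (PySem.Set.add vis m.2.2) c.2.2)) <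
      ds.countP (fun c => !(PySem.Set.contains vis c.2.2)) := by
  have hnv : PySem.Set.contains vis m.2.2 = false := by
    rcases Bool.and_eq_true _ _ |>.mp hc with ⟨_, h2⟩
    simpa using h2
  refine countP_lt_of_mem ?_ hm (by rw [hnv]; rfl) (by rw [contains_add_eq]; simp)
  intro a ha
  simp only [Bool.not_eq_true'] at ha ⊢
  rw [contains_add_eq] at ha
  exact (Bool.or_eq_false_iff.mp ha).1

-- B's while-loop: scan for the smallest crossing dart; stop when none is left
def selLoop (ds : List (Int × Int × Int)) (vis : PySem.Set Int)
    (mst : List (Int × Int × Int)) : List (Int × Int × Int) :=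
  if h : (bestCand ds vis).isSome then
    let c := (bestCand ds vis).get h
    selLoop ds (PySem.Set.add vis c.2.2) (mst ++ [(c.2.1, c.2.2, c.1)])
  else mst
  termination_by ds.countP (fun c => !(PySem.Set.contains vis c.2.2))
  decreasing_by
    have hs : bestCand ds vis = some ((bestCand ds vis).get h) := (Option.some_get h).symm
    rcases foldl_bestStep_some vis ds none _ hs with ⟨hm, hc⟩ | habs
    · exact selMeasure_lt ds vis _ hm hc
    · cases habs

def primSel (edges : List (Int × Int × Int)) : List (Int × Int × Int) :=
  selLoop (darts edges) (PySem.Set.add PySem.Set.empty (edges.headD (0, 0, 0)).1) []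

-- unvisited tree keys (termination measure of the stack loop only)
def ucT (tree : PySem.Dict Int (List (Int × Int))) (vis : PySem.Set Int) : Nat :=
  tree.keys.countP (fun k => !(PySem.Set.contains vis k))

theorem ucT_add_lt (tree : PySem.Dict Int (List (Int × Int))) (vis : PySem.Set Int) (v : Int)
    (hk : tree.contains v = true) (hv : PySem.Set.contains vis v = false) :
    ucT tree (PySem.Set.add vis v) < ucT tree vis := by
  unfold ucT
  have hv' : v ∉ vis := fun hm => by
    rw [(PySem.Set.contains_iff _ _).mpr hm] at hv; cases hv
  refine countP_lt_of_mem (x := v) ?_ ((PySem.Dict.contains_iff_mem_keys _ _).mp hk)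
    (by simp [hv']) (by simp [contains_add_eq])
  intro a ha
  rw [contains_add_eq] at ha
  rcases hx : PySem.Set.contains vis a with _ | _
  · simp
  · rw [hx] at ha; simp at ha

-- B-side: the explicit-stack preorder walk (python pops from the end of the list;
-- the stack is modelled head-at-top, so extending with reversed neighbours becomes
-- prepending the neighbour list)
def stackWalk (tree : PySem.Dict Int (List (Int × Int))) :
    List Int → PySem.Set Int × List Int → PySem.Set Int × List Int
  | [], s => s
  | v :: rest, s =>
    if PySem.Set.contains s.1 v then stackWalk tree rest s
    else stackWalk tree ((tree.getD v []).map Prod.fst ++ rest)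
        (PySem.Set.add s.1 v, s.2 ++ [v])
  termination_by l s => (ucT tree s.1, l.length)
  decreasing_by
  · exact Prod.Lex.right _ (Nat.lt_succ_self _)
  · rename_i hvis
    by_cases hk : tree.contains v = true
    · exact Prod.Lex.left _ _ (ucT_add_lt tree s.1 v hk (by simpa using hvis))
    · have h1 : tree.getD v [] = [] :=
        PySem.Dict.getD_of_not_contains tree [] (by simpa using hk)
      have h2 : ucT tree (PySem.Set.add s.1 v) = ucT tree s.1 := by
        unfold ucT
        refine List.countP_congr (fun k hkk => ?_)
        have hkv : k ≠ v := by
          rintro rfl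
          exact hk ((PySem.Dict.contains_iff_mem_keys _ _).mpr hkk)
        rw [contains_add_eq]
        simp [hkv]
      rw [h1, h2]
      exact Prod.Lex.right _ (by simp)

-- one iteration of the weight-table loop (pair-indexed, first MST edge per pair wins)
def wtStep (d : PySem.Dict (Int × Int) Int) (e : Int × Int × Int) : PySem.Dict (Int × Int) Int :=
  (d.setdefault (e.1, e.2.1) e.2.2).setdefault (e.2.1, e.1) e.2.2

def wtBuild (mst : List (Int × Int × Int)) : PySem.Dict (Int × Int) Int :=
  mst.foldl wtStep PySem.Dict.empty

def approx_tsp_tour_alt (edges : List (Int × Int × Int)) : List Int × Int :=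
  let mst := primSel edges
  let root := (edges.headD (0, 0, 0)).1
  let tree := buildTree mst
  let H := (stackWalk tree [root] (PySem.Set.empty, [])).2 ++ [root]
  let wt := wtBuild mst
  let tw := (H.zip H.tail).foldl (fun acc p => acc + wt.getD p 0) 0
  let tw := tw +
    ((edges.find? (fun e =>
        (e.1 == PySem.List.pyGetD H (-2) 0 && e.2.1 == PySem.List.pyGetD H 0 0) ||
        (e.2.1 == PySem.List.pyGetD H (-2) 0 && e.1 == PySem.List.pyGetD H 0 0))).map
      (fun e => e.2.2)).getD 0
  (H, tw)

-- ===== PRECONDITION & SPEC =====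
-- Pre_ excludes exactly the inputs where A raises: the empty list (IndexError on edges[0])
-- and lists whose every edge either is a self-loop at the start node or misses it
-- (the MST is then empty and A's final weight loop raises KeyError on tree[H[0]]).
def Pre_approx_tsp_tour (edges : List (Int × Int × Int)) : Prop :=
  edges ≠ [] ∧ ∃ e ∈ edges,
    ¬((e.1 = (edges.headD (0, 0, 0)).1) ↔ (e.2.1 = (edges.headD (0, 0, 0)).1))
instance (edges : List (Int × Int × Int)) : Decidable (Pre_approx_tsp_tour edges) := by
  unfold Pre_approx_tsp_tour; infer_instance

def pvWitness_approx_tsp_tour : (List (Int × Int × Int)) := [(0, 1, 5), (1, 2, 3)]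

def Spec_approx_tsp_tour (edges : List (Int × Int × Int)) (out : List Int × Int) : Prop := out = approx_tsp_tour_alt edges
instance (edges : List (Int × Int × Int)) (out : List Int × Int) : Decidable (Spec_approx_tsp_tour edges out) := by unfold Spec_approx_tsp_tour; infer_instance

-- ===== CLAIM (what is proved, stated in full; the proofs are below) =====
def Claim_equal_approx_tsp_tour : Prop := ∀ (edges : List (Int × Int × Int)), Dom_approx_tsp_tour edges → Pre_approx_tsp_tour edges → Spec_approx_tsp_tour edges (approx_tsp_tour edges)

-- ===== LEMMAS AND PROOFS =====

-- ---- order facts about the tuple comparisons ----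
theorem tle_refl (a : Int × Int × Int) : tle a a = true := by simp [tle]

theorem tle_total (a b : Int × Int × Int) : tle a b = true ∨ tle b a = true := by
  simp only [tle, Bool.or_eq_true, Bool.and_eq_true, decide_eq_true_eq, beq_iff_eq]
  omega

theorem tle_trans {a b c : Int × Int × Int} (h1 : tle a b = true) (h2 : tle b c = true) :
    tle a c = true := by
  simp only [tle, Bool.or_eq_true, Bool.and_eq_true, decide_eq_true_eq, beq_iff_eq] at h1 h2 ⊢
  omega

theorem tle_antisymm {a b : Int × Int × Int} (h1 : tle a b = true) (h2 : tle b a = true) :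
    a = b := by
  obtain ⟨a1, a2, a3⟩ := a
  obtain ⟨b1, b2, b3⟩ := b
  simp only [tle, Bool.or_eq_true, Bool.and_eq_true, decide_eq_true_eq, beq_iff_eq] at h1 h2
  simp only [Prod.mk.injEq]
  omega

theorem lt3_tle {a b : Int × Int × Int} (h : lt3 a b = true) : tle a b = true := by
  simp only [lt3, Bool.or_eq_true, Bool.and_eq_true, decide_eq_true_eq, beq_iff_eq] at h
  simp only [tle, Bool.or_eq_true, Bool.and_eq_true, decide_eq_true_eq, beq_iff_eq]
  omega

theorem not_lt3 {a b : Int × Int × Int} (h : lt3 a b = false) : tle b a = true := by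
  simp only [lt3, Bool.or_eq_false_iff, Bool.and_eq_false_iff,
    decide_eq_false_iff_not, beq_eq_false_iff_ne, ne_eq] at h
  simp only [tle, Bool.or_eq_true, Bool.and_eq_true, decide_eq_true_eq, beq_iff_eq]
  by_cases h1 : a.1 = b.1 <;> by_cases h2 : a.2.1 = b.2.1 <;> omega

-- ---- the best-candidate scan returns the minimum crossing dart ----
theorem foldl_bestStep_min (vis : PySem.Set Int) :
    ∀ (ds : List (Int × Int × Int)) (acc : Option (Int × Int × Int)) (m : Int × Int × Int),
      ds.foldl (bestStep vis) acc = some m →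
      (∀ c ∈ ds, isCand vis c = true → tle m c = true) ∧
      (∀ b, acc = some b → tle m b = true) := by
  intro ds
  induction ds with
  | nil =>
    intro acc m h
    simp only [List.foldl_nil] at h
    refine ⟨fun c hc => absurd hc (List.not_mem_nil), fun b hb => ?_⟩
    rw [h] at hb
    cases hb
    exact tle_refl _
  | cons c t ih =>
    intro acc m h
    simp only [List.foldl_cons] at h
    obtain ⟨h1, h2⟩ := ih _ _ h
    by_cases hcond : (isCand vis c && acc.all (fun b => lt3 c b)) = true
    · have hacc' : bestStep vis acc c = some c := by
        unfold bestStep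
        rw [if_pos hcond]
      have hmc : tle m c = true := h2 c (by rw [hacc'])
      refine ⟨fun c' hc' hcand' => ?_, fun b hb => ?_⟩
      · rcases List.mem_cons.mp hc' with rfl | hmem
        · exact hmc
        · exact h1 c' hmem hcand'
      · subst hb
        obtain ⟨_, hmatch⟩ := Bool.and_eq_true _ _ |>.mp hcond
        rw [Option.all_some] at hmatch
        exact tle_trans hmc (lt3_tle hmatch)
    · have hacc' : bestStep vis acc c = acc := by
        unfold bestStep
        rw [if_neg hcond]
      rw [hacc'] at h2
      refine ⟨fun c' hc' hcand' => ?_, h2⟩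
      rcases List.mem_cons.mp hc' with rfl | hmem
      · -- c' is a candidate but was not taken: acc = some b with ¬ lt3 c' b
        rcases hacc : acc with _ | b
        · exfalso
          rw [hacc] at hcond
          simp only [hcand', Option.all_none, Bool.and_true] at hcond
          exact hcond trivial
        · have hnl : lt3 c' b = false := by
            rw [hacc] at hcond
            simp only [hcand', Option.all_some, Bool.true_and] at hcond
            exact Bool.not_eq_true _ |>.mp hcond
          exact tle_trans (h2 b hacc) (not_lt3 hnl)
      · exact h1 c' hmem hcand'

theorem foldl_bestStep_none (vis : PySem.Set Int) :
    ∀ (ds : List (Int × Int × Int)) (acc : Option (Int × Int × Int)),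
      ds.foldl (bestStep vis) acc = none →
      acc = none ∧ ∀ c ∈ ds, isCand vis c = false := by
  intro ds
  induction ds with
  | nil =>
    intro acc h
    simp only [List.foldl_nil] at h
    exact ⟨h, fun c hc => absurd hc (List.not_mem_nil)⟩
  | cons c t ih =>
    intro acc h
    simp only [List.foldl_cons] at h
    obtain ⟨hacc', hrest⟩ := ih _ h
    by_cases hcond : (isCand vis c && acc.all (fun b => lt3 c b)) = true
    · unfold bestStep at hacc'
      rw [if_pos hcond] at hacc'
      cases hacc'
    · unfold bestStep at hacc'
      rw [if_neg hcond] at hacc'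
      subst hacc'
      refine ⟨rfl, fun c' hc' => ?_⟩
      rcases List.mem_cons.mp hc' with rfl | hmem
      · simp only [Option.all_none, Bool.and_true] at hcond
        exact Bool.not_eq_true _ |>.mp hcond
      · exact hrest c' hmem

theorem bestCand_eq_some_of_min (ds : List (Int × Int × Int)) (vis : PySem.Set Int)
    (m : Int × Int × Int) (hmem : m ∈ ds) (hc : isCand vis m = true)
    (hmin : ∀ c ∈ ds, isCand vis c = true → tle m c = true) :
    bestCand ds vis = some m := by
  cases h : bestCand ds vis with
  | none =>
    have := (foldl_bestStep_none vis ds none h).2 m hmem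
    rw [hc] at this; cases this
  | some m' =>
    rcases foldl_bestStep_some vis ds none m' h with ⟨hm', hc'⟩ | habs
    · have h1 := (foldl_bestStep_min vis ds none m' h).1 m hmem hc
      have h2 := hmin m' hm' hc'
      rw [tle_antisymm h1 h2]
    · cases habs

theorem bestCand_eq_none (ds : List (Int × Int × Int)) (vis : PySem.Set Int)
    (hall : ∀ c ∈ ds, isCand vis c = true → False) : bestCand ds vis = none := by
  cases h : bestCand ds vis with
  | none => rfl
  | some m =>
    rcases foldl_bestStep_some vis ds none m h with ⟨hm, hc⟩ | habs
    · exact absurd hc (by intro hx; exact hall m hm hx)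
    · cases habs

-- ---- createGraph's adjacency lists are exactly the darts grouped by source ----
theorem getD_pad {ν : Type} (d : PySem.Dict Int (List ν)) (k a : Int) :
    (if d.contains k then d else d.insert k []).getD a [] = d.getD a [] := by
  by_cases hc : d.contains k = true
  · rw [if_pos hc]
  · rw [if_neg hc, PySem.Dict.getD_insert]
    split_ifs with hak
    · subst hak
      rw [PySem.Dict.getD_of_not_contains d [] (by simpa using hc)]
    · rfl

theorem gStep_getD (g : PySem.Dict Int (List (Int × Int × Int))) (e : Int × Int × Int) (n : Int) :
    (gStep g e).getD n [] =
      g.getD n [] ++ (darts [e]).filter (fun c => c.2.1 == n) := by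
  obtain ⟨u, v, w⟩ := e
  unfold gStep darts
  simp only [PySem.Dict.getD_modify, getD_pad, List.flatMap_cons, List.flatMap_nil,
    List.append_nil, List.filter_cons, List.filter_nil]
  by_cases hv : n = v <;> by_cases hu : n = u
  · subst hv; subst hu
    simp
  · subst hv
    simp only [if_pos rfl, if_neg hu, getD_pad]
    have h1 : ((w, u, n).2.1 == n) = false := by simpa using Ne.symm hu
    have h2 : ((w, n, u).2.1 == n) = true := by simp
    simp [h1, h2]
  · subst hu
    simp only [if_neg hv, if_pos rfl, getD_pad]
    have h1 : ((w, n, v).2.1 == n) = true := by simp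
    have h2 : ((w, v, n).2.1 == n) = false := by simpa using Ne.symm hv
    simp [h1, h2]
  · simp only [if_neg hv, if_neg hu, getD_pad]
    have h1 : ((w, u, v).2.1 == n) = false := by simpa using Ne.symm hu
    have h2 : ((w, v, u).2.1 == n) = false := by simpa using Ne.symm hv
    simp [h1, h2]

theorem foldl_gStep_getD (edges : List (Int × Int × Int)) :
    ∀ (d : PySem.Dict Int (List (Int × Int × Int))) (n : Int),
      (edges.foldl gStep d).getD n [] =
        d.getD n [] ++ (darts edges).filter (fun c => c.2.1 == n) := by
  induction edges with
  | nil => intro d n; simp [darts]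
  | cons e rest ih =>
    intro d n
    simp only [List.foldl_cons]
    rw [ih, gStep_getD]
    have : darts (e :: rest) = darts [e] ++ darts rest := by
      simp [darts]
    rw [this, List.filter_append, List.append_assoc]

theorem createGraph_getD (edges : List (Int × Int × Int)) (n : Int) :
    (createGraph edges).getD n [] = (darts edges).filter (fun c => c.2.1 == n) := by
  unfold createGraph
  rw [foldl_gStep_getD, PySem.Dict.getD_empty, List.nil_append]

theorem contains_pad {ν : Type} (d : PySem.Dict Int (List ν)) (k n : Int) :
    (if d.contains k then d else d.insert k []).contains n = (n == k || d.contains n) := by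
  by_cases hc : d.contains k = true
  · rw [if_pos hc]
    by_cases hnk : n = k
    · subst hnk; simp [hc]
    · simp [hnk]
  · rw [if_neg hc, PySem.Dict.contains_insert]

theorem gStep_contains (g : PySem.Dict Int (List (Int × Int × Int))) (e : Int × Int × Int)
    (n : Int) :
    (gStep g e).contains n = (n == e.1 || n == e.2.1 || g.contains n) := by
  unfold gStep
  rw [PySem.Dict.contains_modify, PySem.Dict.contains_modify, contains_pad, contains_pad]
  cases hbu : (n == e.1) <;> cases hbv : (n == e.2.1) <;> simp [hbu, hbv]

theorem foldl_gStep_contains (edges : List (Int × Int × Int)) :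
    ∀ (d : PySem.Dict Int (List (Int × Int × Int))) (n : Int),
      (edges.foldl gStep d).contains n =
        (d.contains n || edges.any (fun e => n == e.1 || n == e.2.1)) := by
  induction edges with
  | nil => intro d n; simp
  | cons e rest ih =>
    intro d n
    simp only [List.foldl_cons, List.any_cons]
    rw [ih, gStep_contains]
    cases h1 : (n == e.1) <;> cases h2 : (n == e.2.1) <;> simp [h1, h2]

theorem mem_darts {c : Int × Int × Int} {edges : List (Int × Int × Int)} :
    c ∈ darts edges ↔ ∃ e ∈ edges, c = (e.2.2, e.1, e.2.1) ∨ c = (e.2.2, e.2.1, e.1) := by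
  simp only [darts, List.mem_flatMap, List.mem_cons, List.not_mem_nil, or_false]

theorem darts_contains_dst {c : Int × Int × Int} {edges : List (Int × Int × Int)}
    (hc : c ∈ darts edges) : (createGraph edges).contains c.2.2 = true := by
  unfold createGraph
  rw [foldl_gStep_contains, PySem.Dict.contains_empty, Bool.false_or]
  rw [List.any_eq_true]
  rcases mem_darts.mp hc with ⟨e, he, rfl | rfl⟩
  · exact ⟨e, he, by simp⟩
  · exact ⟨e, he, by simp⟩

-- ---- hpush preserves sortedness and membership ----
theorem mem_hpush {x : Int × Int × Int} {l : List (Int × Int × Int)} {y : Int × Int × Int} :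
    x ∈ hpush l y ↔ x ∈ l ∨ x = y := by
  induction l with
  | nil => simp [hpush]
  | cons a t ih =>
    rw [hpush]
    split_ifs with h
    · simp only [List.mem_cons]
      tauto
    · simp only [List.mem_cons, ih]
      tauto

theorem hpush_sorted {l : List (Int × Int × Int)} {x : Int × Int × Int}
    (h : l.Pairwise (fun a b => tle a b = true)) :
    (hpush l x).Pairwise (fun a b => tle a b = true) := by
  induction l with
  | nil => simp [hpush]
  | cons a t ih =>
    rw [List.pairwise_cons] at h
    obtain ⟨ha, ht⟩ := h
    rw [hpush]
    split_ifs with hx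
    · refine List.pairwise_cons.mpr ⟨?_, List.pairwise_cons.mpr ⟨ha, ht⟩⟩
      intro z hz
      rcases List.mem_cons.mp hz with rfl | hzt
      · exact hx
      · exact tle_trans hx (ha z hzt)
    · refine List.pairwise_cons.mpr ⟨?_, ih ht⟩
      intro z hz
      rcases mem_hpush.mp hz with hzt | rfl
      · exact ha z hzt
      · rcases tle_total a z with h1 | h2
        · exact h1
        · exact absurd h2 (by simpa using hx)

-- ---- the conditional-push fold of the accept branch ----
theorem mem_foldl_condpush {P : Int × Int × Int → Prop} [DecidablePred P] :
    ∀ (l hp : List (Int × Int × Int)) (c : Int × Int × Int),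
      c ∈ l.foldl (fun hp e => if P e then hpush hp e else hp) hp →
      c ∈ hp ∨ c ∈ l := by
  intro l
  induction l with
  | nil => intro hp c h; exact Or.inl h
  | cons e t ih =>
    intro hp c h
    simp only [List.foldl_cons] at h
    rcases ih _ _ h with hin | hmem
    · split_ifs at hin with hc
      · rcases mem_hpush.mp hin with h1 | rfl
        · exact Or.inl h1
        · exact Or.inr List.mem_cons_self
      · exact Or.inl hin
    · exact Or.inr (List.mem_cons_of_mem _ hmem)

theorem mem_foldl_condpush_of_mem_hp {P : Int × Int × Int → Prop} [DecidablePred P] :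
    ∀ (l hp : List (Int × Int × Int)) (c : Int × Int × Int), c ∈ hp →
      c ∈ l.foldl (fun hp e => if P e then hpush hp e else hp) hp := by
  intro l
  induction l with
  | nil => intro hp c h; exact h
  | cons e t ih =>
    intro hp c h
    simp only [List.foldl_cons]
    refine ih _ _ ?_
    split_ifs with hc
    · exact mem_hpush.mpr (Or.inl h)
    · exact h

theorem mem_foldl_condpush_of_mem_l {P : Int × Int × Int → Prop} [DecidablePred P] :
    ∀ (l hp : List (Int × Int × Int)) (c : Int × Int × Int), c ∈ l → P c →
      c ∈ l.foldl (fun hp e => if P e then hpush hp e else hp) hp := by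
  intro l
  induction l with
  | nil => intro hp c h; cases h
  | cons e t ih =>
    intro hp c h hc
    simp only [List.foldl_cons]
    rcases List.mem_cons.mp h with rfl | hmem
    · refine mem_foldl_condpush_of_mem_hp _ _ _ ?_
      rw [if_pos hc]
      exact mem_hpush.mpr (Or.inr rfl)
    · exact ih _ _ hmem hc

theorem foldl_condpush_sorted {P : Int × Int × Int → Prop} [DecidablePred P] :
    ∀ (l hp : List (Int × Int × Int)),
      hp.Pairwise (fun a b => tle a b = true) →
      (l.foldl (fun hp e => if P e then hpush hp e else hp) hp).Pairwise
        (fun a b => tle a b = true) := by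
  intro l
  induction l with
  | nil => intro hp h; exact h
  | cons e t ih =>
    intro hp h
    simp only [List.foldl_cons]
    refine ih _ ?_
    split_ifs with hc
    · exact hpush_sorted h
    · exact h

-- plain-push fold of prim's initialisation
theorem mem_foldl_hpush :
    ∀ (l hp : List (Int × Int × Int)) (c : Int × Int × Int),
      c ∈ l.foldl hpush hp ↔ c ∈ hp ∨ c ∈ l := by
  intro l
  induction l with
  | nil => intro hp c; simp
  | cons e t ih =>
    intro hp c
    simp only [List.foldl_cons, ih, mem_hpush, List.mem_cons]
    tauto

theorem foldl_hpush_sorted :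
    ∀ (l hp : List (Int × Int × Int)),
      hp.Pairwise (fun a b => tle a b = true) →
      (l.foldl hpush hp).Pairwise (fun a b => tle a b = true) := by
  intro l
  induction l with
  | nil => intro hp h; exact h
  | cons e t ih =>
    intro hp h
    simp only [List.foldl_cons]
    exact ih _ (hpush_sorted h)

-- ---- A's visited dictionary initialisation ----
theorem getD_foldl_insert_false :
    ∀ (ks : List Int) (d : PySem.Dict Int Bool) (n : Int),
      (ks.foldl (fun d k => d.insert k false) d).getD n true =
        if n ∈ ks then false else d.getD n true := by
  intro ks
  induction ks with
  | nil => intro d n; simp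
  | cons k t ih =>
    intro d n
    simp only [List.foldl_cons]
    rw [ih]
    by_cases hnt : n ∈ t
    · simp [hnt]
    · rw [if_neg hnt, PySem.Dict.getD_insert]
      by_cases hnk : n = k
      · subst hnk; simp
      · simp [hnk, hnt]

-- ---- the heap Prim loop equals the selection Prim loop ----
theorem primLoop_eq_selLoop (edges : List (Int × Int × Int))
    (D : PySem.Dict Int Bool) (mst heap : List (Int × Int × Int)) :
    ∀ (S : PySem.Set Int),
      heap.Pairwise (fun a b => tle a b = true) →
      (∀ c ∈ heap, c ∈ darts edges ∧ PySem.Set.contains S c.2.1 = true) →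
      (∀ c ∈ darts edges, PySem.Set.contains S c.2.1 = true →
        D.getD c.2.2 true = false → c ∈ heap) →
      (∀ n : Int, D.getD n true = false ↔
        ((createGraph edges).contains n = true ∧ PySem.Set.contains S n = false)) →
      primLoop (createGraph edges) D mst heap = selLoop (darts edges) S mst := by
  induction D, mst, heap using primLoop.induct (createGraph edges) with
  | case1 D mst =>
    intro S _ _ hsup hvis
    rw [selLoop]
    rw [dif_neg]
    · rw [primLoop]
    · rw [Bool.not_eq_true, Option.isSome_eq_false_iff, Option.isNone_iff_eq_none]
      refine bestCand_eq_none _ _ (fun c hc hcand => ?_)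
      obtain ⟨h1, h2⟩ := Bool.and_eq_true _ _ |>.mp hcand
      have hD : D.getD c.2.2 true = false :=
        (hvis c.2.2).mpr ⟨darts_contains_dst hc, by simpa using h2⟩
      exact absurd (hsup c hc h1 hD) List.not_mem_nil
  | case2 D mst w u v rest h visited' heap' ih =>
    intro S hsort hsub hsup hvis
    -- the popped head is the minimum crossing dart
    obtain ⟨hdart, hsrc⟩ := hsub (w, u, v) List.mem_cons_self
    obtain ⟨hgc, hSv⟩ := (hvis v).mp h
    have hcand : isCand S (w, u, v) = true := by
      simp only [isCand, hsrc, hSv]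
      rfl
    have hmin : ∀ c ∈ darts edges, isCand S c = true → tle (w, u, v) c = true := by
      intro c hc hcand'
      obtain ⟨h1, h2⟩ := Bool.and_eq_true _ _ |>.mp hcand'
      have hD : D.getD c.2.2 true = false :=
        (hvis c.2.2).mpr ⟨darts_contains_dst hc, by simpa using h2⟩
      rcases List.mem_cons.mp (hsup c hc h1 hD) with rfl | hmem
      · exact tle_refl _
      · exact (List.pairwise_cons.mp hsort).1 c hmem
    have hbest : bestCand (darts edges) S = some (w, u, v) :=
      bestCand_eq_some_of_min _ _ _ hdart hcand hmin
    rw [primLoop, dif_pos h]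
    conv_rhs => rw [selLoop]
    rw [dif_pos (by rw [hbest]; rfl)]
    have hget : (bestCand (darts edges) S).get (by rw [hbest]; rfl) = (w, u, v) := by
      simp [hbest]
    simp only [hget]
    refine ih (PySem.Set.add S v) ?_ ?_ ?_ ?_
    · -- sortedness of heap'
      exact foldl_condpush_sorted _ _ (List.pairwise_cons.mp hsort).2
    · -- every heap' element is a dart with visited source
      intro c hc
      rcases mem_foldl_condpush _ _ _ hc with hrest | hadj
      · obtain ⟨h1, h2⟩ := hsub c (List.mem_cons_of_mem _ hrest)
        exact ⟨h1, by rw [contains_add_eq, h2]; rfl⟩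
      · rw [createGraph_getD] at hadj
        obtain ⟨h1, h2⟩ := List.mem_filter.mp hadj
        refine ⟨h1, ?_⟩
        rw [contains_add_eq, (beq_iff_eq.mp h2)]
        simp
    · -- every crossing dart is in heap'
      intro c hc hsrc' hD'
      have hne : c.2.2 ≠ v := by
        intro hx
        rw [hx, PySem.Dict.getD_insert, if_pos rfl] at hD'
        cases hD'
      have hD : D.getD c.2.2 true = false := by
        rw [PySem.Dict.getD_insert, if_neg hne] at hD'
        exact hD'
      rw [contains_add_eq, Bool.or_eq_true] at hsrc'
      rcases hsrc' with hold | hnew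
      · have hin := hsup c hc hold hD
        rcases List.mem_cons.mp hin with rfl | hmem
        · -- c would be the head, but the head's dst v is now visited
          exact absurd rfl hne
        · exact mem_foldl_condpush_of_mem_hp _ _ _ hmem
      · refine mem_foldl_condpush_of_mem_l _ _ _ ?_ hD'
        rw [createGraph_getD]
        exact List.mem_filter.mpr ⟨hc, by simpa using beq_iff_eq.mp hnew⟩
    · -- visited-dict / visited-set correspondence
      intro n
      rw [PySem.Dict.getD_insert]
      by_cases hn : n = v
      · subst hn
        rw [if_pos rfl]
        constructor
        · intro hx; cases hx
        · rintro ⟨-, hx⟩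
          rw [contains_add_eq] at hx
          simp at hx
      · rw [if_neg hn, hvis n, contains_add_eq]
        have : (n == v) = false := by simpa using hn
        rw [this, Bool.or_false]
  | case3 D mst w u v rest h ih =>
    intro S hsort hsub hsup hvis
    rw [primLoop, dif_neg h]
    refine ih S (List.pairwise_cons.mp hsort).2
      (fun c hc => hsub c (List.mem_cons_of_mem _ hc)) ?_ hvis
    intro c hc hsrc' hD
    rcases List.mem_cons.mp (hsup c hc hsrc' hD) with rfl | hmem
    · exact absurd hD h
    · exact hmem

theorem contains_add_empty (v n : Int) :
    PySem.Set.contains (PySem.Set.add PySem.Set.empty v) n = (n == v) := by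
  rw [contains_add_eq]
  have : PySem.Set.contains (PySem.Set.empty (α := Int)) n = false := by
    simp [PySem.Set.empty, PySem.Set.contains]
  rw [this, Bool.false_or]

theorem prim_eq_primSel (edges : List (Int × Int × Int)) : prim edges = primSel edges := by
  unfold prim primSel
  set root := (edges.headD (0, 0, 0)).1 with hroot
  refine primLoop_eq_selLoop edges _ _ _ (PySem.Set.add PySem.Set.empty root) ?_ ?_ ?_ ?_
  · exact foldl_hpush_sorted _ _ (by simp)
  · intro c hc
    have hmem : c ∈ (createGraph edges).getD root [] := by
      rcases (mem_foldl_hpush _ _ _).mp hc with h | h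
      · cases h
      · exact h
    rw [createGraph_getD] at hmem
    obtain ⟨h1, h2⟩ := List.mem_filter.mp hmem
    exact ⟨h1, by rw [contains_add_empty, h2]⟩
  · intro c hc hsrc _
    rw [contains_add_empty] at hsrc
    refine (mem_foldl_hpush _ _ _).mpr (Or.inr ?_)
    rw [createGraph_getD]
    exact List.mem_filter.mpr ⟨hc, hsrc⟩
  · intro n
    rw [PySem.Dict.getD_insert]
    by_cases hn : n = root
    · subst hn
      rw [if_pos rfl]
      constructor
      · intro hx; cases hx
      · rintro ⟨-, hx⟩
        rw [contains_add_empty] at hx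
        simp at hx
    · rw [if_neg hn, getD_foldl_insert_false, contains_add_empty]
      have hnv : (n == root) = false := by simpa using hn
      rw [hnv]
      by_cases hk : n ∈ (createGraph edges).keys
      · rw [if_pos hk]
        simp [(PySem.Dict.contains_iff_mem_keys _ _).mpr hk]
      · rw [if_neg hk]
        have : (createGraph edges).contains n = false := by
          rcases hx : (createGraph edges).contains n with _ | _
          · rfl
          · exact absurd ((PySem.Dict.contains_iff_mem_keys _ _).mp hx) hk
        simp [this]

-- ---- vis only grows along the stack walk ----
theorem stackWalk_vis_mono (tree : PySem.Dict Int (List (Int × Int))) (l : List Int)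
    (s : PySem.Set Int × List Int) (x : Int) (hx : PySem.Set.contains s.1 x = true) :
    PySem.Set.contains (stackWalk tree l s).1 x = true := by
  revert hx
  fun_induction stackWalk tree l s with
  | case1 s => exact id
  | case2 s v rest hv ih => exact ih
  | case3 s v rest hv ih =>
    intro hx
    refine ih ?_
    rw [contains_add_eq, hx]
    rfl

-- unvisited keys never increase along the walk
theorem ucT_stackWalk_le (tree : PySem.Dict Int (List (Int × Int))) (l : List Int)
    (s : PySem.Set Int × List Int) :
    ucT tree (stackWalk tree l s).1 ≤ ucT tree s.1 := by
  unfold ucT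
  refine List.countP_mono_left (fun a _ ha => ?_)
  rcases hx : PySem.Set.contains s.1 a with _ | _
  · simp
  · rw [stackWalk_vis_mono tree l s a hx] at ha; simp at ha

-- the stack walk splits over list append
theorem stackWalk_append (tree : PySem.Dict Int (List (Int × Int))) (a b : List Int)
    (s : PySem.Set Int × List Int) :
    stackWalk tree (a ++ b) s = stackWalk tree b (stackWalk tree a s) := by
  induction a, s using stackWalk.induct tree with
  | case1 s =>
    rw [List.nil_append]
    conv_rhs => rw [stackWalk]
  | case2 s v rest hv ih =>
    rw [List.cons_append, stackWalk, if_pos hv]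
    conv_rhs => rw [stackWalk, if_pos hv]
    exact ih
  | case3 s v rest hv ih =>
    rw [List.cons_append, stackWalk, if_neg hv, ← List.append_assoc]
    conv_rhs => rw [stackWalk, if_neg hv]
    exact ih

-- every adjacency list is bounded by adjMax
theorem le_foldl_max_self (t : List (List (Int × Int))) (m : Nat) :
    m ≤ t.foldl (fun m l => max m l.length) m := by
  induction t generalizing m with
  | nil => exact Nat.le_refl _
  | cons b t' ih => exact le_trans (Nat.le_max_left _ _) (ih _)

theorem foldl_max_le (ls : List (List (Int × Int))) (x : List (Int × Int)) (hx : x ∈ ls) :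
    ∀ m : Nat, x.length ≤ ls.foldl (fun m l => max m l.length) m := by
  induction ls with
  | nil => cases hx
  | cons a t ih =>
    intro m
    rcases List.mem_cons.mp hx with rfl | hxt
    · exact le_trans (Nat.le_max_right _ _) (le_foldl_max_self _ _)
    · exact ih hxt _

theorem adjLen_le (tree : PySem.Dict Int (List (Int × Int))) (v : Int) :
    (tree.getD v []).length ≤ adjMax tree := by
  rcases hc : tree.contains v with _ | _
  · rw [PySem.Dict.getD_of_not_contains tree [] hc]
    exact Nat.zero_le _
  · have hg : ∃ val, tree.get? v = some val := by
      rw [PySem.Dict.contains_eq_isSome_get?] at hc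
      cases hx : tree.get? v with
      | none => rw [hx] at hc; cases hc
      | some val => exact ⟨val, rfl⟩
    obtain ⟨val, hval⟩ := hg
    have hmem : val ∈ tree.values := by
      have := PySem.Dict.mem_items_of_get?_eq_some _ hval
      rw [PySem.Dict.values]
      exact List.mem_map.mpr ⟨(v, val), this, rfl⟩
    have hgd : tree.getD v [] = val := PySem.Dict.getD_of_get?_eq_some _ _ hval
    rw [hgd]
    exact foldl_max_le _ _ hmem 0

theorem ucT_add_eq (tree : PySem.Dict Int (List (Int × Int))) (vis : PySem.Set Int) (v : Int)
    (hk : tree.contains v = false) :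
    ucT tree (PySem.Set.add vis v) = ucT tree vis := by
  unfold ucT
  refine List.countP_congr (fun k hkk => ?_)
  have hkv : k ≠ v := by
    rintro rfl
    rw [(PySem.Dict.contains_iff_mem_keys _ _).mpr hkk] at hk
    cases hk
  rw [contains_add_eq]
  simp [hkv]

theorem dfsA_eq_stackWalk (tree : PySem.Dict Int (List (Int × Int))) (fuel : Nat)
    (l : List Int) (s : PySem.Set Int × List Int)
    (h : ucT tree s.1 * (adjMax tree + 2) + l.length ≤ fuel) :
    dfsA tree fuel l s = stackWalk tree l s := by
  revert h
  fun_induction dfsA tree fuel l s with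
  | case1 fuel s =>
    intro _
    conv_rhs => rw [stackWalk]
  | case2 fuel v vs s hv ih =>
    intro h
    rw [stackWalk, if_pos hv]
    exact ih (by simp only [List.length_cons] at h; omega)
  | case3 v vs s hv =>
    intro h
    exfalso
    simp only [List.length_cons] at h
    omega
  | case4 v vs s hv fuel ih1 ih2 =>
    intro h
    simp only [List.length_cons] at h
    have hnb : (List.map Prod.fst (tree.getD v [])).length ≤ adjMax tree := by
      rw [List.length_map]; exact adjLen_le tree v
    have hb1 : ucT tree (PySem.Set.add s.1 v) * (adjMax tree + 2) +
        (List.map Prod.fst (tree.getD v [])).length ≤ fuel := by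
      rcases hc : tree.contains v with _ | _
      · rw [ucT_add_eq tree s.1 v hc]
        have h0 : (List.map Prod.fst (tree.getD v [])).length = 0 := by
          rw [List.length_map, PySem.Dict.getD_of_not_contains tree [] hc]
          rfl
        omega
      · have hlt := ucT_add_lt tree s.1 v hc (by simpa using hv)
        have hle : ucT tree (PySem.Set.add s.1 v) ≤ ucT tree s.1 - 1 := by omega
        have hmul := Nat.mul_le_mul_right (adjMax tree + 2) hle
        have h1 : ucT tree s.1 = ucT tree s.1 - 1 + 1 := by omega
        have hsm : ucT tree s.1 * (adjMax tree + 2) =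
            (ucT tree s.1 - 1) * (adjMax tree + 2) + (adjMax tree + 2) := by
          conv_lhs => rw [h1]
          ring
        omega
    have h1 := ih1 hb1
    rw [h1] at ih2 ⊢
    have hres := ucT_stackWalk_le tree (List.map Prod.fst (tree.getD v []))
        (PySem.Set.add s.1 v, s.2 ++ [v])
    have hpair : (PySem.Set.add s.1 v, s.2 ++ [v]).1 = PySem.Set.add s.1 v := rfl
    rw [hpair] at hres
    have hb2 : ucT tree (stackWalk tree (List.map Prod.fst (tree.getD v []))
        (PySem.Set.add s.1 v, s.2 ++ [v])).1 * (adjMax tree + 2) + vs.length ≤ fuel := by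
      rcases hc : tree.contains v with _ | _
      · have heq := ucT_add_eq tree s.1 v hc
        have hle : ucT tree (stackWalk tree (List.map Prod.fst (tree.getD v []))
            (PySem.Set.add s.1 v, s.2 ++ [v])).1 ≤ ucT tree s.1 := heq ▸ hres
        have hmul := Nat.mul_le_mul_right (adjMax tree + 2) hle
        omega
      · have hlt := ucT_add_lt tree s.1 v hc (by simpa using hv)
        have hle : ucT tree (stackWalk tree (List.map Prod.fst (tree.getD v []))
            (PySem.Set.add s.1 v, s.2 ++ [v])).1 ≤ ucT tree s.1 - 1 := by omega
        have hmul := Nat.mul_le_mul_right (adjMax tree + 2) hle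
        have h2 : ucT tree s.1 = ucT tree s.1 - 1 + 1 := by omega
        have hsm : ucT tree s.1 * (adjMax tree + 2) =
            (ucT tree s.1 - 1) * (adjMax tree + 2) + (adjMax tree + 2) := by
          conv_lhs => rw [h2]
          ring
        omega
    rw [ih2 hb2, ← stackWalk_append, stackWalk, if_neg hv]

theorem walk_eq (tree : PySem.Dict Int (List (Int × Int))) (root : Int) :
    dfsA tree (fuelBound tree) [root] (PySem.Set.empty, []) =
      stackWalk tree [root] (PySem.Set.empty, []) := by
  refine dfsA_eq_stackWalk tree _ _ _ ?_
  have hemp : ucT tree (PySem.Set.empty, ([] : List Int)).1 = tree.keys.length := by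
    unfold ucT
    rw [List.countP_congr (q := fun _ => true) (fun a _ => by simp [PySem.Set.empty])]
    rw [List.countP_true]
  rw [hemp]
  unfold fuelBound
  simp

-- ---- the adjacency-list scan of A's weight loop and B's weight table agree ----
theorem treeStep_getD (t : PySem.Dict Int (List (Int × Int))) (u v w a : Int) :
    (treeStep t (u, v, w)).getD a [] =
      if a = v then
        (if v = u then t.getD u [] ++ [(v, w)] else t.getD v []) ++ [(u, w)]
      else if a = u then t.getD u [] ++ [(v, w)] else t.getD a [] := by
  unfold treeStep
  simp only [PySem.Dict.getD_modify, getD_pad]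

theorem step_pres (t : PySem.Dict Int (List (Int × Int))) (d : PySem.Dict (Int × Int) Int)
    (hInv : ∀ a b : Int, (t.getD a []).find? (fun p => p.1 == b) =
      (d.get? (a, b)).map (fun w => (b, w)))
    (u v w : Int) :
    ∀ a b : Int, ((treeStep t (u, v, w)).getD a []).find? (fun p => p.1 == b) =
      ((wtStep d (u, v, w)).get? (a, b)).map (fun w => (b, w)) := by
  intro a b
  rw [treeStep_getD]
  unfold wtStep
  by_cases hav : a = v
  · subst hav
    by_cases hau : a = u
    · subst hau
      rw [if_pos rfl, if_pos rfl]
      have hc1 : (PySem.Dict.setdefault d (a, a) w).contains (a, a) = true := by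
        rw [PySem.Dict.contains_setdefault]
        simp
      rw [PySem.Dict.setdefault_of_contains _ _ hc1]
      by_cases hba : b = a
      · subst hba
        rw [PySem.Dict.get?_setdefault_self]
        have hthis := hInv b b
        rw [List.find?_append, List.find?_append]
        cases hd : d.get? (b, b) with
        | none =>
          rw [hd] at hthis
          replace hthis : List.find? (fun p => p.1 == b) (t.getD b []) = none := hthis
          simp [hthis, List.find?]
        | some w0 =>
          rw [hd] at hthis
          simp [hthis, List.find?]
      · rw [PySem.Dict.get?_setdefault_of_ne _ _ (fun h => hba (congrArg Prod.snd h))]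
        have hthis := hInv a b
        rw [List.find?_append, List.find?_append]
        have hne : ((a, w).1 == b) = false := by
          simp only [beq_eq_false_iff_ne]
          exact Ne.symm hba
        simp only [List.find?, hne]
        simp [hthis]
    · rw [if_pos rfl, if_neg hau]
      by_cases hbu : b = u
      · subst hbu
        rw [PySem.Dict.get?_setdefault_self,
          PySem.Dict.get?_setdefault_of_ne _ _ (fun h => hau (congrArg Prod.fst h))]
        have hthis := hInv a b
        rw [List.find?_append]
        cases hd : d.get? (a, b) with
        | none =>
          rw [hd] at hthis
          replace hthis : List.find? (fun p => p.1 == b) (t.getD a []) = none := hthis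
          simp [hthis, List.find?]
        | some w0 =>
          rw [hd] at hthis
          simp [hthis, List.find?]
      · rw [PySem.Dict.get?_setdefault_of_ne _ _ (fun h => hbu (congrArg Prod.snd h)),
          PySem.Dict.get?_setdefault_of_ne _ _ (fun h => hau (congrArg Prod.fst h))]
        have hthis := hInv a b
        rw [List.find?_append]
        have hne : ((u, w).1 == b) = false := by
          simp only [beq_eq_false_iff_ne]
          exact Ne.symm hbu
        simp only [List.find?, hne]
        simp [hthis]
  · by_cases hau : a = u
    · subst hau
      rw [if_neg hav, if_pos rfl]
      by_cases hbv : b = v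
      · subst hbv
        rw [PySem.Dict.get?_setdefault_of_ne _ _ (fun h => hav (congrArg Prod.fst h)),
          PySem.Dict.get?_setdefault_self]
        have hthis := hInv a b
        rw [List.find?_append]
        cases hd : d.get? (a, b) with
        | none =>
          rw [hd] at hthis
          replace hthis : List.find? (fun p => p.1 == b) (t.getD a []) = none := hthis
          simp [hthis, List.find?]
        | some w0 =>
          rw [hd] at hthis
          simp [hthis, List.find?]
      · rw [PySem.Dict.get?_setdefault_of_ne _ _ (fun h => hav (congrArg Prod.fst h)),
          PySem.Dict.get?_setdefault_of_ne _ _ (fun h => hbv (congrArg Prod.snd h))]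
        have hthis := hInv a b
        rw [List.find?_append]
        have hne : ((v, w).1 == b) = false := by
          simp only [beq_eq_false_iff_ne]
          exact Ne.symm hbv
        simp only [List.find?, hne]
        simp [hthis]
    · rw [if_neg hav, if_neg hau,
        PySem.Dict.get?_setdefault_of_ne _ _ (fun h => hav (congrArg Prod.fst h)),
        PySem.Dict.get?_setdefault_of_ne _ _ (fun h => hau (congrArg Prod.fst h))]
      exact hInv a b

theorem find_wt_aux (mst : List (Int × Int × Int)) :
    ∀ (t : PySem.Dict Int (List (Int × Int))) (d : PySem.Dict (Int × Int) Int),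
      (∀ a b : Int, (t.getD a []).find? (fun p => p.1 == b) =
        (d.get? (a, b)).map (fun w => (b, w))) →
      ∀ a b : Int, ((mst.foldl treeStep t).getD a []).find? (fun p => p.1 == b) =
        ((mst.foldl wtStep d).get? (a, b)).map (fun w => (b, w)) := by
  induction mst with
  | nil => intro t d hInv; exact hInv
  | cons e rest ih =>
    intro t d hInv
    obtain ⟨u, v, w⟩ := e
    simp only [List.foldl_cons]
    exact ih _ _ (step_pres t d hInv u v w)

theorem find_eq_wt (mst : List (Int × Int × Int)) (a b : Int) :
    ((buildTree mst).getD a []).find? (fun p => p.1 == b) =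
      ((wtBuild mst).get? (a, b)).map (fun w => (b, w)) := by
  unfold buildTree wtBuild
  refine find_wt_aux mst _ _ (fun a b => ?_) a b
  rw [PySem.Dict.getD_empty, PySem.Dict.get?_empty]
  rfl

-- A's index loop over range(len(H)-1) is the fold over consecutive pairs
theorem range_fold_eq_zip_fold (H : List Int) (f : Int → Int → Int → Int) (z : Int) :
    (PySem.List.pyRange 0 (PySem.List.len H - 1) 1).foldl
        (fun acc i => f acc (PySem.List.pyGetD H i 0) (PySem.List.pyGetD H (i + 1) 0)) z =
      (H.zip H.tail).foldl (fun acc p => f acc p.1 p.2) z := by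
  have haux : ∀ (L : List Int) (z : Int),
      (List.range (L.length - 1)).foldl
          (fun acc k => f acc (L.getD k 0) (L.getD (k + 1) 0)) z =
        (L.zip L.tail).foldl (fun acc p => f acc p.1 p.2) z := by
    intro L
    induction L with
    | nil => intro z; rfl
    | cons x t ih =>
      intro z
      cases t with
      | nil => rfl
      | cons y t' =>
        simp only [List.length_cons, Nat.add_sub_cancel, List.range_succ_eq_map,
          List.foldl_cons, List.foldl_map]
        simp only [List.getD_cons_succ, List.getD_cons_zero]
        have := ih (z := f z x y)
        simpa only [List.length_cons, Nat.add_sub_cancel] using this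
  rw [PySem.List.pyRange_one, List.foldl_map]
  have hn : (PySem.List.len H - 1 - 0).toNat = H.length - 1 := by
    simp only [PySem.List.len_eq]; omega
  rw [hn]
  simp only [zero_add, ← Nat.cast_add_one, PySem.List.pyGetD_natCast]
  exact haux H z

-- A's closing-edge loop is find?
theorem closingA_eq_find (edges : List (Int × Int × Int)) (x y : Int) :
    closingA edges x y =
      ((edges.find? (fun e =>
          (e.1 == x && e.2.1 == y) || (e.2.1 == x && e.1 == y))).map
        (fun e => e.2.2)).getD 0 := by
  induction edges with
  | nil => rfl
  | cons e rest ih =>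
    obtain ⟨a, b, w⟩ := e
    by_cases hc : ((a == x && b == y) || (b == x && a == y)) = true
    · rw [List.find?_cons_of_pos (by simpa using hc)]
      simp [closingA, hc]
    · have hc' : ¬ ((a == x && b == y) || (b == x && a == y)) = true := hc
      rw [List.find?_cons_of_neg (by exact hc')]
      simp only [closingA, if_neg hc']
      exact ih

theorem ports_agree (edges : List (Int × Int × Int)) :
    approx_tsp_tour edges = approx_tsp_tour_alt edges := by
  simp only [approx_tsp_tour, approx_tsp_tour_alt]
  rw [← prim_eq_primSel, walk_eq]
  simp only [Prod.mk.injEq]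
  refine ⟨trivial, ?_⟩
  have h1 := range_fold_eq_zip_fold
    ((stackWalk (buildTree (prim edges)) [(edges.headD (0, 0, 0)).1] (PySem.Set.empty, [])).2 ++
      [(edges.headD (0, 0, 0)).1])
    (fun acc x y =>
      match ((buildTree (prim edges)).getD x []).find? (fun q => q.1 == y) with
      | some q => acc + q.2
      | none => acc) 0
  have h2 : (fun (acc : Int) (p : Int × Int) =>
      match ((buildTree (prim edges)).getD p.1 []).find? (fun q => q.1 == p.2) with
      | some q => acc + q.2
      | none => acc) =
      (fun (acc : Int) (p : Int × Int) => acc + (wtBuild (prim edges)).getD p 0) := by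
    funext acc p
    obtain ⟨x, y⟩ := p
    rw [find_eq_wt (prim edges) x y, PySem.Dict.getD_eq_get?_getD]
    cases h : (wtBuild (prim edges)).get? (x, y) with
    | none => simp [h]
    | some w0 => simp [h]
  rw [h2] at h1
  rw [closingA_eq_find]
  simp only [h1]

-- ===== VERDICT (by name: the statement is the Claim_ definition above) =====
theorem approx_tsp_tour_spec : Claim_equal_approx_tsp_tour := by
  intro edges _ _
  exact ports_agree edges
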